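-- pv_equiv track=rewrite | github.com/Nils-Treuheit/ML_Course | decisiontree.py | infoSubset
-- ===== SOURCE A (Python) =====
-- def infoSubset(LockedFeatures, Subset, AttNum):
--     AFCDList = {}
--     Classdistribution = {}
--     for i in range(AttNum):
--         if (LockedFeatures[i]==""):
--             AFCDList[("att"+str(i))]={}
--     for instance in Subset:
--         classifier = instance["classifier"]
--         if Classdistribution.get(classifier):
--             Classdistribution[classifier]+=1
--         else: Classdistribution[classifier]=1
--         for att in instance:
--             if att in AFCDList:
--                 feature = instance[att]
--                 if AFCDList[att].get(feature):
--                     if AFCDList[att][feature].get(classifier):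
--                         AFCDList[att][feature][classifier]+=1
--                     else: AFCDList[att][feature][classifier]=1
--                 else:
--                     AFCDList[att][feature]={}
--                     AFCDList[att][feature][classifier]=1
--     return AFCDList,Classdistribution
-- ===== SOURCE B (Python) =====
-- def infoSubset(LockedFeatures, Subset, AttNum):
--     # attribute-major: class tally first, then one independent scan of the subset per unlocked attribute
--     classes = [inst["classifier"] for inst in Subset]
--     Classdistribution = {}
--     for c in classes:
--         Classdistribution[c] = Classdistribution.get(c, 0) + 1
--     AFCDList = {}
--     for i in range(AttNum):
--         if LockedFeatures[i] != "":
--             continue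
--         att = "att" + str(i)
--         fdict = {}
--         for inst, c in zip(Subset, classes):
--             if att in inst:
--                 cdict = fdict.setdefault(inst[att], {})
--                 cdict[c] = cdict.get(c, 0) + 1
--         AFCDList[att] = fdict
--     return AFCDList, Classdistribution
-- ===== Notes on version B (the rewrite author's own statement) =====
-- stated objective: alternative
-- what changed: A makes one instance-major pass mutating the nested att->feature->classifier dicts as it scans; B is attribute-major: it tallies the class distribution from a precomputed classes list, then builds each unlocked attribute's feature->classifier table with its own independent scan of the subset, so no shared nested accumulator is threaded through the instance loop.
import Mathlib
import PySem

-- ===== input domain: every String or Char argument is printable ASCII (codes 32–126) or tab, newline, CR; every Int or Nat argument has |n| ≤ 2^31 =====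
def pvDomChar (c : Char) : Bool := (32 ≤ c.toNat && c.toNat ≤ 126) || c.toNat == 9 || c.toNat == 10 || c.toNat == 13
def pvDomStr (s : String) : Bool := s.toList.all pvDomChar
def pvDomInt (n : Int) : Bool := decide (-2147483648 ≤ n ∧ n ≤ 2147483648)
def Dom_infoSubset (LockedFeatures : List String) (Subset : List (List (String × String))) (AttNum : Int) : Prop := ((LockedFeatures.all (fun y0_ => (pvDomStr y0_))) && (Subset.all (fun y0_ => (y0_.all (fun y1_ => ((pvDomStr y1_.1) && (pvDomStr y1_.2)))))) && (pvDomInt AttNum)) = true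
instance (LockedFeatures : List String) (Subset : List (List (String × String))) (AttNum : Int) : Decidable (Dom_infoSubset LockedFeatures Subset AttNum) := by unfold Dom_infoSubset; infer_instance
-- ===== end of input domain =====

-- B replaces A's single instance-major pass over a shared nested accumulator by an
-- attribute-major scheme: class tally first, then an independent scan of the subset per
-- unlocked attribute building that attribute's feature→classifier table (objective: alternative).

-- ===== PORT A =====
-- shared helpers: "att"+str(i) and instance["classifier"]
def pvAttName (i : Int) : String := "att" ++ PySem.Int.toStr i
def pvClsOf (inst : List (String × String)) : String := (PySem.Dict.mk inst).getD "classifier" ""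

-- A: Classdistribution update (get-truthiness branch)
def pvACls (cd : PySem.Dict String Int) (c : String) : PySem.Dict String Int :=
  if cd.getD c 0 ≠ 0 then cd.insert c (cd.getD c 0 + 1) else cd.insert c 1

-- A: inner 'for att in instance' body (re-inserting models Python's in-place mutation)
def pvAInner (c : String) (d : PySem.Dict String (PySem.Dict String (PySem.Dict String Int)))
    (p : String × String) : PySem.Dict String (PySem.Dict String (PySem.Dict String Int)) :=
  if d.contains p.1 then
    let inner := d.getD p.1 PySem.Dict.empty
    let fd := inner.getD p.2 PySem.Dict.empty
    if fd.items ≠ [] then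
      if fd.getD c 0 ≠ 0 then d.insert p.1 (inner.insert p.2 (fd.insert c (fd.getD c 0 + 1)))
      else d.insert p.1 (inner.insert p.2 (fd.insert c 1))
    else d.insert p.1 (inner.insert p.2 (PySem.Dict.empty.insert c 1))
  else d

def infoSubset (LockedFeatures : List String) (Subset : List (List (String × String))) (AttNum : Int) : (List (String × List (String × List (String × Int)))) × (List (String × Int)) :=
  let afcd0 := (PySem.List.pyRange 0 AttNum 1).foldl
    (fun d i => if PySem.List.pyGetD LockedFeatures i " " == "" then d.insert (pvAttName i) PySem.Dict.empty else d)
    PySem.Dict.empty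
  let st := Subset.foldl
    (fun st inst => (List.foldl (pvAInner (pvClsOf inst)) st.1 inst, pvACls st.2 (pvClsOf inst)))
    (afcd0, PySem.Dict.empty)
  (st.1.items.map (fun q => (q.1, q.2.items.map (fun r => (r.1, r.2.items)))), st.2.items)

-- ===== PORT B =====
-- B: per-instance step of one attribute's scan: if att in inst, bump fdict[inst[att]][c]
def pvBStep (att : String) (fd : PySem.Dict String (PySem.Dict String Int))
    (pc : List (String × String) × String) : PySem.Dict String (PySem.Dict String Int) :=
  if (PySem.Dict.mk pc.1).contains att then
    let cdict := fd.getD ((PySem.Dict.mk pc.1).getD att "") PySem.Dict.empty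
    fd.insert ((PySem.Dict.mk pc.1).getD att "") (cdict.insert pc.2 (cdict.getD pc.2 0 + 1))
  else fd

def infoSubset_alt (LockedFeatures : List String) (Subset : List (List (String × String))) (AttNum : Int) : (List (String × List (String × List (String × Int)))) × (List (String × Int)) :=
  let classes := Subset.map pvClsOf
  let cd := classes.foldl (fun cd c => cd.insert c (cd.getD c 0 + 1)) PySem.Dict.empty
  let afcd := (PySem.List.pyRange 0 AttNum 1).foldl
    (fun d i =>
      if PySem.List.pyGetD LockedFeatures i " " ≠ "" then d
      else d.insert (pvAttName i) ((Subset.zip classes).foldl (pvBStep (pvAttName i)) PySem.Dict.empty))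
    PySem.Dict.empty
  (afcd.items.map (fun q => (q.1, q.2.items.map (fun r => (r.1, r.2.items)))), cd.items)

-- ===== PRECONDITION & SPEC =====
-- Pre_ excludes the inputs where the Python A raises (IndexError when AttNum exceeds
-- len(LockedFeatures), KeyError when an instance lacks "classifier") and instances whose
-- association-list representation repeats a key, which a Python dict cannot carry.
def Pre_infoSubset (LockedFeatures : List String) (Subset : List (List (String × String))) (AttNum : Int) : Prop :=
  AttNum ≤ (LockedFeatures.length : Int) ∧
  ∀ inst ∈ Subset, (inst.map Prod.fst).Nodup ∧ "classifier" ∈ inst.map Prod.fst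
instance (LockedFeatures : List String) (Subset : List (List (String × String))) (AttNum : Int) : Decidable (Pre_infoSubset LockedFeatures Subset AttNum) := by unfold Pre_infoSubset; infer_instance

def pvWitness_infoSubset : List String × (List (List (String × String))) × Int :=
  (["", "x"], [[("classifier", "yes"), ("att0", "a")], [("classifier", "no"), ("att0", "a")]], 2)

def Spec_infoSubset (LockedFeatures : List String) (Subset : List (List (String × String))) (AttNum : Int) (out : (List (String × List (String × List (String × Int)))) × (List (String × Int))) : Prop := out = infoSubset_alt LockedFeatures Subset AttNum
instance (LockedFeatures : List String) (Subset : List (List (String × String))) (AttNum : Int) (out : (List (String × List (String × List (String × Int)))) × (List (String × Int))) : Decidable (Spec_infoSubset LockedFeatures Subset AttNum out) := by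
  unfold Spec_infoSubset
  letI h1 : DecidableEq (List (String × Int)) := inferInstance
  letI h2 : DecidableEq (List (String × List (String × Int))) := inferInstance
  letI h3 : DecidableEq (List (String × List (String × List (String × Int)))) := inferInstance
  infer_instance

-- ===== CLAIM (what is proved, stated in full; the proofs are below) =====
def Claim_equal_infoSubset : Prop := ∀ (LockedFeatures : List String) (Subset : List (List (String × String))) (AttNum : Int), Dom_infoSubset LockedFeatures Subset AttNum → Pre_infoSubset LockedFeatures Subset AttNum → Spec_infoSubset LockedFeatures Subset AttNum (infoSubset LockedFeatures Subset AttNum)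

-- ===== LEMMAS AND PROOFS =====

-- one nested bump fdict[f][c] += 1 (the common shape both sides reduce to)
def pvPut2 (fd : PySem.Dict String (PySem.Dict String Int)) (q : String × String) :
    PySem.Dict String (PySem.Dict String Int) :=
  let cdict := fd.getD q.1 PySem.Dict.empty
  fd.insert q.1 (cdict.insert q.2 (cdict.getD q.2 0 + 1))

def pvTput (d : PySem.Dict String (PySem.Dict String (PySem.Dict String Int)))
    (t : String × String × String) : PySem.Dict String (PySem.Dict String (PySem.Dict String Int)) :=
  d.insert t.1 (pvPut2 (d.getD t.1 PySem.Dict.empty) t.2)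

theorem pvKeysInsert {κ ν : Type} [BEq κ] [LawfulBEq κ] (d : PySem.Dict κ ν) (k : κ) (v : ν) :
    (d.insert k v).keys = PySem.Set.add d.keys k := by
  by_cases h : d.contains k = true
  · rw [PySem.Dict.keys_insert_of_contains d v h, PySem.Set.add_of_mem]
    exact (PySem.Dict.contains_iff_mem_keys d k).mp h
  · rw [PySem.Dict.keys_insert_of_not_contains d v (by simpa using h), PySem.Set.add_of_not_mem]
    intro hm; exact h ((PySem.Dict.contains_iff_mem_keys d k).mpr hm)

theorem pvSetUpdate_nil {α : Type} [BEq α] (l : List α) : PySem.Set.update [] l = PySem.Set.ofList l := by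
  simp [PySem.Set.update, PySem.Set.ofList_eq_foldl]

theorem pvSetUpdate_of_subset {α : Type} [BEq α] [LawfulBEq α] (s : PySem.Set α) (l : List α)
    (h : ∀ x ∈ l, x ∈ s) : PySem.Set.update s l = s := by
  induction l generalizing s with
  | nil => simp [PySem.Set.update]
  | cons x t ih =>
    have hx : PySem.Set.add s x = s := PySem.Set.add_of_mem (h x (by simp))
    have hstep : PySem.Set.update s (x :: t) = PySem.Set.update (PySem.Set.add s x) t := by
      simp [PySem.Set.update]
    rw [hstep, hx, ih s (fun y hy => h y (by simp [hy]))]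

theorem pvAInner_eq (c : String) (d : PySem.Dict String (PySem.Dict String (PySem.Dict String Int)))
    (p : String × String) :
    pvAInner c d p = if d.contains p.1 then pvTput d (p.1, p.2, c) else d := by
  unfold pvAInner pvTput pvPut2
  by_cases hc : d.contains p.1 = true
  · simp only [hc, if_true]
    by_cases he : (((d.getD p.1 PySem.Dict.empty).getD p.2 PySem.Dict.empty)).items = []
    · have hfd : (d.getD p.1 PySem.Dict.empty).getD p.2 PySem.Dict.empty = PySem.Dict.empty :=
        PySem.Dict.ext (by simpa using he)
      simp [hfd]
    · simp only [he, ne_eq, not_false_iff, if_true]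
      by_cases hz : ((d.getD p.1 PySem.Dict.empty).getD p.2 PySem.Dict.empty).getD c 0 = 0
      · simp [hz]
      · simp [hz]
  · simp [hc]

theorem pvKeys_tput (d : PySem.Dict String (PySem.Dict String (PySem.Dict String Int)))
    (t : String × String × String) : (pvTput d t).keys = PySem.Set.add d.keys t.1 := by
  unfold pvTput; exact pvKeysInsert _ _ _

def pvTriples (allowed : PySem.Set String) (Subset : List (List (String × String))) :
    List (String × String × String) :=
  Subset.flatMap (fun inst =>
    (inst.filter (fun p => PySem.Set.contains allowed p.1)).map (fun p => (p.1, p.2, pvClsOf inst)))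

theorem pvTriples_att (allowed : PySem.Set String) (Subset : List (List (String × String)))
    (t : String × String × String) (ht : t ∈ pvTriples allowed Subset) : t.1 ∈ allowed := by
  rcases List.mem_flatMap.mp ht with ⟨inst, _, hm⟩
  rcases List.mem_map.mp hm with ⟨p, hp, rfl⟩
  have := (List.mem_filter.mp hp).2
  rw [PySem.Set.contains_eq_decide] at this
  exact of_decide_eq_true this

theorem pvAInnerRed (allowed : PySem.Set String) (inst : List (String × String)) (c : String)
    (d : PySem.Dict String (PySem.Dict String (PySem.Dict String Int))) (hK : d.keys = allowed) :
    List.foldl (pvAInner c) d inst =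
      ((inst.filter (fun p => PySem.Set.contains allowed p.1)).map
        (fun p => (p.1, p.2, c))).foldl pvTput d ∧
    (List.foldl (pvAInner c) d inst).keys = allowed := by
  induction inst generalizing d with
  | nil => exact ⟨rfl, hK⟩
  | cons p inst ih =>
    rw [List.foldl_cons, pvAInner_eq, List.filter_cons]
    have hc : d.contains p.1 = PySem.Set.contains allowed p.1 := by
      rw [PySem.Dict.contains_eq_decide_mem_keys, hK, PySem.Set.contains_eq_decide]
    by_cases h : PySem.Set.contains allowed p.1 = true
    · have hmem : p.1 ∈ allowed := by
        rw [PySem.Set.contains_eq_decide] at h; exact of_decide_eq_true h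
      have hkeys : (pvTput d (p.1, p.2, c)).keys = allowed := by
        rw [pvKeys_tput, hK, PySem.Set.add_of_mem hmem]
      rw [hc, if_pos h, h, if_pos rfl, List.map_cons, List.foldl_cons]
      exact ih _ hkeys
    · have h' : PySem.Set.contains allowed p.1 = false := by simpa using h
      rw [hc, if_neg h, h', if_neg (by simp)]
      exact ih _ hK

theorem pvARed (allowed : PySem.Set String) (Subset : List (List (String × String)))
    (d : PySem.Dict String (PySem.Dict String (PySem.Dict String Int))) (hK : d.keys = allowed) :
    Subset.foldl (fun d inst => List.foldl (pvAInner (pvClsOf inst)) d inst) d =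
      (pvTriples allowed Subset).foldl pvTput d := by
  induction Subset generalizing d with
  | nil => rfl
  | cons inst Subset ih =>
    rw [List.foldl_cons]
    obtain ⟨heq, hkeys⟩ := pvAInnerRed allowed inst (pvClsOf inst) d hK
    rw [heq]
    have : pvTriples allowed (inst :: Subset) =
        ((inst.filter (fun p => PySem.Set.contains allowed p.1)).map
          (fun p => (p.1, p.2, pvClsOf inst))) ++ pvTriples allowed Subset := by
      simp [pvTriples]
    rw [this, List.foldl_append]
    exact ih _ (by rw [← heq]; exact hkeys)

theorem pvBase_getD (l : List String) (d : PySem.Dict String (PySem.Dict String (PySem.Dict String Int)))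
    (hd : ∀ a, d.getD a PySem.Dict.empty = PySem.Dict.empty) (a : String) :
    (l.foldl (fun d a => d.insert a PySem.Dict.empty) d).getD a PySem.Dict.empty = PySem.Dict.empty := by
  induction l generalizing d with
  | nil => exact hd a
  | cons b l ih =>
    rw [List.foldl_cons]
    refine ih _ (fun x => ?_)
    rw [PySem.Dict.getD_insert]
    by_cases h : x = b
    · simp [h]
    · simp [h, hd]

-- the per-key trace of the A-side fold
theorem pvGetD_tput (d : PySem.Dict String (PySem.Dict String (PySem.Dict String Int)))
    (t : String × String × String) (a : String) :
    (pvTput d t).getD a PySem.Dict.empty =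
      if t.1 = a then pvPut2 (d.getD a PySem.Dict.empty) t.2 else d.getD a PySem.Dict.empty := by
  unfold pvTput
  rw [PySem.Dict.getD_insert]
  by_cases h : a = t.1
  · simp [h]
  · rw [if_neg h, if_neg (fun hh => h (Eq.symm hh))]

theorem pvFoldTput_getD (L : List (String × String × String))
    (d : PySem.Dict String (PySem.Dict String (PySem.Dict String Int))) (a : String) :
    (L.foldl pvTput d).getD a PySem.Dict.empty =
      ((L.filter (fun t => t.1 == a)).map (fun t => t.2)).foldl pvPut2 (d.getD a PySem.Dict.empty) := by
  induction L generalizing d with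
  | nil => rfl
  | cons t L ih =>
    rw [List.foldl_cons, ih, List.filter_cons]
    by_cases h : t.1 = a
    · simp only [h, beq_self_eq_true, if_true, List.map_cons, List.foldl_cons, pvGetD_tput]
    · have hb : (t.1 == a) = false := by simpa using h
      simp only [hb, Bool.false_eq_true, if_false, pvGetD_tput, if_neg h]

-- getD through a fold inserting a per-key value
theorem pvFoldInsF_getD (F : String → PySem.Dict String (PySem.Dict String Int))
    (l : List String) (d : PySem.Dict String (PySem.Dict String (PySem.Dict String Int))) (a : String) :
    (l.foldl (fun d x => d.insert x (F x)) d).getD a PySem.Dict.empty =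
      if a ∈ l then F a else d.getD a PySem.Dict.empty := by
  induction l generalizing d with
  | nil => simp
  | cons b l ih =>
    rw [List.foldl_cons, ih, PySem.Dict.getD_insert]
    by_cases ht : a ∈ l
    · simp [ht]
    · by_cases hb : a = b
      · simp [hb]
      · simp [ht, hb]

-- under unique keys, the pairs of inst with key a are exactly the dict lookup
theorem pvFilterKey (inst : List (String × String)) (a : String)
    (h : (inst.map Prod.fst).Nodup) :
    inst.filter (fun p => p.1 == a) =
      if (PySem.Dict.mk inst).contains a then [(a, (PySem.Dict.mk inst).getD a "")] else [] := by
  induction inst with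
  | nil => simp [PySem.Dict.contains]
  | cons p t ih =>
    rw [List.map_cons, List.nodup_cons] at h
    rw [List.filter_cons]
    by_cases hp : p.1 = a
    · have hb : (p.1 == a) = true := by simpa using hp
      have hfil : t.filter (fun q => q.1 == a) = [] := by
        rw [List.filter_eq_nil_iff]
        intro q hq hbeq
        exact h.1 (by rw [hp, ← show q.1 = a from by simpa using hbeq]; exact List.mem_map_of_mem hq)
      have hcon : (PySem.Dict.mk (p :: t)).contains a = true := by
        simp [PySem.Dict.contains, hb]
      have hget : (PySem.Dict.mk (p :: t)).getD a "" = p.2 := by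
        simp [PySem.Dict.getD, PySem.Dict.get?, List.find?_cons_of_pos, hb]
      rw [if_pos hb, hfil, hcon, if_pos rfl, hget]
      rw [show p = (a, p.2) from by rw [← hp]]
    · have hb : (p.1 == a) = false := by simpa using hp
      have hcon : (PySem.Dict.mk (p :: t)).contains a = (PySem.Dict.mk t).contains a := by
        simp [PySem.Dict.contains, hb]
      have hget : (PySem.Dict.mk (p :: t)).getD a "" = (PySem.Dict.mk t).getD a "" := by
        simp [PySem.Dict.getD, PySem.Dict.get?, List.find?_cons_of_neg, hb]
      rw [if_neg (by simp [hb]), ih h.2, hcon, hget]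

-- B's per-instance step is the fold of pvPut2 over that instance's matching pairs
theorem pvBStep_eq (a : String) (inst : List (String × String)) (c : String)
    (h : (inst.map Prod.fst).Nodup) (fd : PySem.Dict String (PySem.Dict String Int)) :
    pvBStep a fd (inst, c) =
      ((inst.filter (fun p => p.1 == a)).map (fun p => (p.2, c))).foldl pvPut2 fd := by
  rw [pvFilterKey inst a h]
  unfold pvBStep pvPut2
  by_cases hc : (PySem.Dict.mk inst).contains a = true
  · simp [hc]
  · simp [hc]

-- the A-side triples with head a, projected, per instance (a unlocked)
theorem pvTriplesProj (allowed : PySem.Set String) (Subset : List (List (String × String)))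
    (a : String) (ha : PySem.Set.contains allowed a = true) :
    ((pvTriples allowed Subset).filter (fun t => t.1 == a)).map (fun t => t.2) =
      Subset.flatMap (fun inst =>
        (inst.filter (fun p => p.1 == a)).map (fun p => (p.2, pvClsOf inst))) := by
  unfold pvTriples
  rw [List.filter_flatMap, List.map_flatMap]
  refine congrArg (fun f => List.flatMap f Subset) (funext (fun inst => ?_))
  rw [List.filter_map, List.filter_filter, List.map_map]
  have hfun : (fun p : String × String =>
      ((fun t : String × String × String => t.1 == a) ∘ fun p => (p.1, p.2, pvClsOf inst)) p &&
        PySem.Set.contains allowed p.1) = fun p => p.1 == a := by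
    funext p
    by_cases hp : p.1 = a
    · have hm : a ∈ allowed := by
        rw [PySem.Set.contains_eq_decide] at ha; exact of_decide_eq_true ha
      simp [hp, hm]
    · simp [hp]
  rw [hfun]
  rfl

theorem pvZipSelf (S : List (List (String × String))) :
    S.zip (S.map pvClsOf) = S.map (fun i => (i, pvClsOf i)) := by
  induction S with
  | nil => rfl
  | cons x xs ih => simp [ih]

-- ===== main equality =====
theorem pvMain (LockedFeatures : List String) (Subset : List (List (String × String)))
    (AttNum : Int) (hPre : Pre_infoSubset LockedFeatures Subset AttNum) :
    infoSubset LockedFeatures Subset AttNum = infoSubset_alt LockedFeatures Subset AttNum := by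
  obtain ⟨-, hinsts⟩ := hPre
  simp only [infoSubset, infoSubset_alt]
  -- A's init fold → fold of inserts over attKeys
  rw [PySem.List.foldl_if_eq_foldl_filter (fun i => PySem.List.pyGetD LockedFeatures i " " == "")
      (fun (d : PySem.Dict String (PySem.Dict String (PySem.Dict String Int))) (i : Int) =>
        d.insert (pvAttName i) PySem.Dict.empty),
    ← List.foldl_map (f := pvAttName)
      (g := fun (d : PySem.Dict String (PySem.Dict String (PySem.Dict String Int))) (a : String) =>
        d.insert a PySem.Dict.empty)]
  -- B's outer fold → fold of inserts over attKeys
  have hBif : (fun (d : PySem.Dict String (PySem.Dict String (PySem.Dict String Int))) (i : Int) =>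
      if PySem.List.pyGetD LockedFeatures i " " ≠ "" then d
      else d.insert (pvAttName i)
        ((Subset.zip (Subset.map pvClsOf)).foldl (pvBStep (pvAttName i)) PySem.Dict.empty)) =
      (fun d i => if (PySem.List.pyGetD LockedFeatures i " " == "") = true then
        d.insert (pvAttName i)
          ((Subset.zip (Subset.map pvClsOf)).foldl (pvBStep (pvAttName i)) PySem.Dict.empty)
        else d) := by
    funext d i
    by_cases h : PySem.List.pyGetD LockedFeatures i " " = "" <;> simp [h]
  rw [hBif,
    PySem.List.foldl_if_eq_foldl_filter (fun i => PySem.List.pyGetD LockedFeatures i " " == "")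
      (fun (d : PySem.Dict String (PySem.Dict String (PySem.Dict String Int))) (i : Int) =>
        d.insert (pvAttName i)
          ((Subset.zip (Subset.map pvClsOf)).foldl (pvBStep (pvAttName i)) PySem.Dict.empty)),
    ← List.foldl_map (f := pvAttName)
      (g := fun (d : PySem.Dict String (PySem.Dict String (PySem.Dict String Int))) (a : String) =>
        d.insert a ((Subset.zip (Subset.map pvClsOf)).foldl (pvBStep a) PySem.Dict.empty))]
  set attKeys := ((PySem.List.pyRange 0 AttNum 1).filter
    (fun i => PySem.List.pyGetD LockedFeatures i " " == "")).map pvAttName with hattKeys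
  set allowed : PySem.Set String := PySem.Set.ofList attKeys with hallowed
  set pvF := fun a => (Subset.zip (Subset.map pvClsOf)).foldl (pvBStep a) PySem.Dict.empty with hpvF
  set d0 := attKeys.foldl (fun d a => d.insert a PySem.Dict.empty) PySem.Dict.empty with hd0
  rw [PySem.List.foldl_prod_mk
      (f := fun d inst => List.foldl (pvAInner (pvClsOf inst)) d inst)
      (g := fun cd inst => pvACls cd (pvClsOf inst))]
  have hd0keys : d0.keys = allowed := by
    rw [hd0, PySem.Dict.keys_foldl_insert (f := fun _ _ => PySem.Dict.empty)]
    simp only [PySem.Dict.keys_empty, pvSetUpdate_nil]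
    exact hallowed.symm
  -- class distributions agree
  have hcd : Subset.foldl (fun cd inst => pvACls cd (pvClsOf inst)) PySem.Dict.empty =
      (Subset.map pvClsOf).foldl
        (fun cd c => cd.insert c (cd.getD c 0 + 1)) PySem.Dict.empty := by
    rw [List.foldl_map]
    refine PySem.List.foldl_congr_mem Subset _ _ _ (fun acc x _ => ?_)
    unfold pvACls
    by_cases h : acc.getD (pvClsOf x) 0 = 0 <;> simp [h]
  -- nested tables agree
  have hA := pvARed allowed Subset d0 hd0keys
  set L := pvTriples allowed Subset with hL
  have hkA : (L.foldl pvTput d0).keys = allowed := by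
    have : pvTput = fun (d : PySem.Dict String (PySem.Dict String (PySem.Dict String Int)))
        (t : String × String × String) =>
        d.insert t.1 (pvPut2 (d.getD t.1 PySem.Dict.empty) t.2) := rfl
    rw [this, PySem.Dict.keys_foldl_insert_key (key := fun t : String × String × String => t.1)
      (f := fun d t => pvPut2 (d.getD t.1 PySem.Dict.empty) t.2), hd0keys]
    exact pvSetUpdate_of_subset _ _ (fun x hx => by
      rcases List.mem_map.mp hx with ⟨t, ht, rfl⟩
      exact pvTriples_att allowed Subset t ht)
  have hkB : (attKeys.foldl (fun d a => d.insert a (pvF a)) PySem.Dict.empty).keys = allowed := by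
    rw [PySem.Dict.keys_foldl_insert (f := fun _ a => pvF a)]
    simp only [PySem.Dict.keys_empty, pvSetUpdate_nil]
    exact hallowed.symm
  have hdict : L.foldl pvTput d0 = attKeys.foldl (fun d a => d.insert a (pvF a)) PySem.Dict.empty := by
    apply PySem.Dict.ext
    rw [PySem.Dict.items_eq_map_keys _ (hkA ▸ (hallowed ▸ PySem.Set.nodup_ofList attKeys)) PySem.Dict.empty,
      PySem.Dict.items_eq_map_keys _ (hkB ▸ (hallowed ▸ PySem.Set.nodup_ofList attKeys)) PySem.Dict.empty,
      hkA, hkB]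
    refine List.map_congr_left (fun a hmem => ?_)
    have haK : a ∈ attKeys := (PySem.Set.mem_ofList _ _).mp (hallowed ▸ hmem)
    have ha : PySem.Set.contains allowed a = true := by
      rw [PySem.Set.contains_eq_decide]
      exact decide_eq_true (hallowed ▸ (PySem.Set.mem_ofList _ _).mpr haK)
    have hgA : (L.foldl pvTput d0).getD a PySem.Dict.empty =
        ((L.filter (fun t => t.1 == a)).map (fun t => t.2)).foldl pvPut2 PySem.Dict.empty := by
      rw [pvFoldTput_getD, hd0, pvBase_getD _ _ (fun x => by rw [PySem.Dict.getD_empty])]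
    have hgB : (attKeys.foldl (fun d a => d.insert a (pvF a)) PySem.Dict.empty).getD a
        PySem.Dict.empty = pvF a := by
      rw [pvFoldInsF_getD pvF attKeys PySem.Dict.empty a, if_pos haK]
    rw [hgA, hgB, hL, pvTriplesProj allowed Subset a ha, List.foldl_flatMap]
    refine congrArg (fun z => (a, z)) ?_
    show _ = (Subset.zip (Subset.map pvClsOf)).foldl (pvBStep a) PySem.Dict.empty
    rw [pvZipSelf Subset, List.foldl_map]
    exact PySem.List.foldl_congr_mem Subset _ _ _ (fun acc inst hm =>
      (pvBStep_eq a inst (pvClsOf inst) (hinsts inst hm).1 acc).symm)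
  rw [hA, hcd, hdict]

-- ===== VERDICT (by name: the statement is the Claim_ definition above) =====
theorem infoSubset_spec : Claim_equal_infoSubset := by
  intro LockedFeatures Subset AttNum _ hPre
  unfold Spec_infoSubset
  exact pvMain LockedFeatures Subset AttNum hPre
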